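-- pv_equiv track=rewrite | github.com/XuShuwenn/KG-R1 | kgqa_agent/src/data_gen/random_walk_impl.py | build_name_path
-- ===== SOURCE A (Python) =====
-- from typing import Optional, List, Dict, Set, Tuple, Callable
--
-- def _short_label(uri: str) -> str:
--     """Last segment of a URI after '#' or '/'."""
--     tail = uri.rsplit('#', 1)[-1]
--     return tail.rsplit('/', 1)[-1]
--
-- def build_name_path(path: List[Dict]) -> str:
--     """Format as: entity -> relation -> entity -> ..."""
--     if not path:
--         return ""
--     segments = [path[0].get("node_name") or _short_label(path[0].get("node_uri", ""))]
--     for i in range(len(path) - 1):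
--         rel_name = path[i].get("relation_name") or _short_label(path[i].get("relation_uri", ""))
--         nxt = path[i + 1]
--         nname = nxt.get("node_name") or _short_label(nxt.get("node_uri", ""))
--         segments.extend([rel_name, nname])
--     return " -> ".join(segments)
-- ===== SOURCE B (Python) =====
-- def _short_label(uri: str) -> str:
--     """Last segment of a URI after '#' or '/'."""
--     tail = uri.rsplit('#', 1)[-1]
--     return tail.rsplit('/', 1)[-1]
--
-- def build_name_path(path):
--     """Format as: entity -> relation -> entity -> ...
--
--     Builds the string back-to-front: start from the LAST node's label and walk
--     the path in reverse, prepending 'node -> relation -> ' for each earlier hop.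
--     No intermediate segment list and no join."""
--     if not path:
--         return ""
--     last = path[-1]
--     out = last.get("node_name") or _short_label(last.get("node_uri", ""))
--     for p in reversed(path[:-1]):
--         node = p.get("node_name") or _short_label(p.get("node_uri", ""))
--         rel = p.get("relation_name") or _short_label(p.get("relation_uri", ""))
--         out = node + " -> " + rel + " -> " + out
--     return out
-- ===== Notes on version B (the rewrite author's own statement) =====
-- stated objective: alternative
-- what changed: A accumulates a segment list forward over range(len(path)-1) and joins it; B builds the output string back-to-front, starting from the last node's label and walking path[:-1] in reverse, prepending 'node -> rel -> ' by direct concatenation with no segment list and no join.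
import Mathlib
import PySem

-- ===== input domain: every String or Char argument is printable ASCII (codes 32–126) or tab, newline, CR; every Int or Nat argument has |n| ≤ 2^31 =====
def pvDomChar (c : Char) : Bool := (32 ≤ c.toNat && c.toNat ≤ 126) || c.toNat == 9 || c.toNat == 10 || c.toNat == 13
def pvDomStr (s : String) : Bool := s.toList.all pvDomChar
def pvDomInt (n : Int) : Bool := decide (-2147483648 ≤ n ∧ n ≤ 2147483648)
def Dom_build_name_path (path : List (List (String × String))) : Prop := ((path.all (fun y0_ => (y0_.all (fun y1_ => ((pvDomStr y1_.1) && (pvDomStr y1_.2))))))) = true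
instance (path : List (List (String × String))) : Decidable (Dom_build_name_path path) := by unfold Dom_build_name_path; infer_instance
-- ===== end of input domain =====

-- B builds the string back-to-front (reverse walk, direct concatenation, no segment list / join) where A accumulates a segment list forward and joins it ("alternative").

-- ===== PORT A =====
-- exact by hand: uri.rsplit(sep, 1)[-1] for a one-char sep is the suffix after the
-- last occurrence of sep (the whole string when sep does not occur)
def pvAfterLast (c : Char) (cs : List Char) : List Char :=
  (cs.reverse.takeWhile (fun x => x ≠ c)).reverse

def pvShortLabel (uri : String) : String :=
  String.ofList (pvAfterLast '/' (pvAfterLast '#' uri.toList))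

-- `d.get(nameKey) or _short_label(d.get(uriKey, ""))`: None and "" are both falsy
def pvLabel (d : PySem.Dict String String) (nameKey uriKey : String) : String :=
  let v := d.getD nameKey ""
  if v = "" then pvShortLabel (d.getD uriKey "") else v

def pvNodeLabel (p : List (String × String)) : String :=
  pvLabel (PySem.Dict.ofList p) "node_name" "node_uri"

def pvRelLabel (p : List (String × String)) : String :=
  pvLabel (PySem.Dict.ofList p) "relation_name" "relation_uri"

def build_name_path (path : List (List (String × String))) : String :=
  if path = [] then ""
  else
    let segments : List String := [pvNodeLabel (PySem.List.pyGetD path 0 [])]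
    let segments := (PySem.List.pyRange 0 ((path.length : Int) - 1) 1).foldl
      (fun segs i =>
        segs ++ [pvRelLabel (PySem.List.pyGetD path i []),
                 pvNodeLabel (PySem.List.pyGetD path (i + 1) [])]) segments
    PySem.Str.join " -> " segments

-- ===== PORT B =====
-- out starts at the last node's label; the reversed loop over path[:-1] prepends
-- "node -> rel -> " for each earlier hop
def build_name_path_alt (path : List (List (String × String))) : String :=
  if path = [] then ""
  else
    let out := pvNodeLabel (PySem.List.pyGetD path (-1) [])
    ((PySem.List.slice path none (some (-1))).reverse).foldl
      (fun out p => pvNodeLabel p ++ " -> " ++ pvRelLabel p ++ " -> " ++ out) out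

-- ===== PRECONDITION & SPEC =====
def Spec_build_name_path (path : List (List (String × String))) (out : String) : Prop := out = build_name_path_alt path
instance (path : List (List (String × String))) (out : String) : Decidable (Spec_build_name_path path out) := by unfold Spec_build_name_path; infer_instance

-- ===== CLAIM (what is proved, stated in full; the proofs are below) =====
def Claim_equal_build_name_path : Prop := ∀ (path : List (List (String × String))), Dom_build_name_path path → Spec_build_name_path path (build_name_path path)

-- ===== LEMMAS AND PROOFS =====

-- canonical segment list both sides are reduced to
def pvSegs : List (List (String × String)) → List String
  | [] => []
  | [a] => [pvNodeLabel a]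
  | a :: b :: t => pvNodeLabel a :: pvRelLabel a :: pvSegs (b :: t)

theorem pvSegs_cons (b : List (String × String)) (t : List (List (String × String))) :
    ∃ x xs, pvSegs (b :: t) = x :: xs := by
  cases t with
  | nil => exact ⟨_, _, rfl⟩
  | cons c t' => exact ⟨_, _, rfl⟩

theorem pv_join_cons_cons (sep x y : String) (t : List String) :
    PySem.Str.join sep (x :: y :: t) = x ++ sep ++ PySem.Str.join sep (y :: t) := by
  apply String.toList_inj.mp
  simp [PySem.Str.toList_join, PySem.Chars.join_cons_cons]

theorem pv_join_singleton (sep x : String) :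
    PySem.Str.join sep [x] = x := by
  apply String.toList_inj.mp
  simp [PySem.Str.toList_join, PySem.Chars.join_singleton]

-- the adjacent-pair interleave: A's indexed range loop body equals B's zip of dropLast with tail
theorem pv_range_flatMap_eq_zip {α : Type} (r m : α → String) (d : α) :
    ∀ (xs : List α),
      (List.range (xs.length - 1)).flatMap
        (fun i => [r (xs.getD i d), m (xs.getD (i + 1) d)]) =
      (xs.dropLast.zip xs.tail).flatMap (fun ab => [r ab.1, m ab.2]) := by
  intro xs
  induction xs with
  | nil => simp
  | cons a tl ih =>
    cases tl with
    | nil => simp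
    | cons b t =>
      simp only [List.length_cons, Nat.add_sub_cancel, List.range_succ_eq_map,
        List.flatMap_cons, List.flatMap_map, List.dropLast_cons₂, List.tail_cons,
        List.zip_cons_cons, List.getD_cons_zero, List.getD_cons_succ]
      have := ih
      simp only [List.length_cons, Nat.add_sub_cancel, List.getD_cons_succ,
        List.tail_cons] at this
      rw [this]

theorem pv_zip_flatMap_eq_pvSegs :
    ∀ (a : List (String × String)) (tl : List (List (String × String))),
      [pvNodeLabel a] ++
        (((a :: tl).dropLast.zip (a :: tl).tail).flatMap
          (fun ab => [pvRelLabel ab.1, pvNodeLabel ab.2])) =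
      pvSegs (a :: tl) := by
  intro a tl
  induction tl generalizing a with
  | nil => simp [pvSegs]
  | cons b t ih =>
    have h := ih b
    simp only [List.tail_cons] at h
    simp only [List.dropLast_cons₂, List.tail_cons, List.zip_cons_cons,
      List.flatMap_cons, pvSegs, List.cons_append,
      List.nil_append] at h ⊢
    rw [← h]

theorem pv_segments_eq (path : List (List (String × String))) (h : path ≠ []) :
    (PySem.List.pyRange 0 ((path.length : Int) - 1) 1).foldl
      (fun segs i =>
        segs ++ [pvRelLabel (PySem.List.pyGetD path i []),
                 pvNodeLabel (PySem.List.pyGetD path (i + 1) [])])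
      [pvNodeLabel (PySem.List.pyGetD path 0 [])] = pvSegs path := by
  obtain ⟨a, tl, rfl⟩ := List.exists_cons_of_ne_nil h
  rw [PySem.List.foldl_append_eq_flatMap, PySem.List.pyRange_one]
  have hlen : (((a :: tl).length : Int) - 1 - 0).toNat = (a :: tl).length - 1 := by
    simp
  rw [hlen, List.flatMap_map]
  have hget : ∀ k ∈ List.range ((a :: tl).length - 1),
      [pvRelLabel (PySem.List.pyGetD (a :: tl) (0 + (k : Int)) []),
        pvNodeLabel (PySem.List.pyGetD (a :: tl) (0 + (k : Int) + 1) [])] =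
      [pvRelLabel ((a :: tl).getD k []),
        pvNodeLabel ((a :: tl).getD (k + 1) [])] := by
    intro k _
    simp only [zero_add]
    rw [show ((k : Int) + 1) = (((k + 1 : Nat)) : Int) by push_cast; ring]
    rw [PySem.List.pyGetD_natCast, PySem.List.pyGetD_natCast]
  rw [List.flatMap_congr hget, pv_range_flatMap_eq_zip]
  have := pv_zip_flatMap_eq_pvSegs a tl
  simpa [PySem.List.pyGetD] using this

-- B's reversed prepend loop computes the join of the canonical segment list
theorem pv_foldr_eq_join :
    ∀ (tl : List (List (String × String))) (a : List (String × String)),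
      ((a :: tl).dropLast).foldr
        (fun p out => pvNodeLabel p ++ " -> " ++ pvRelLabel p ++ " -> " ++ out)
        (pvNodeLabel ((a :: tl).getLast (by simp))) =
      PySem.Str.join " -> " (pvSegs (a :: tl)) := by
  intro tl
  induction tl with
  | nil => intro a; simp [pvSegs, pv_join_singleton]
  | cons b t ih =>
    intro a
    have hlast : (a :: b :: t).getLast (by simp) = (b :: t).getLast (by simp) := by
      simp [List.getLast_cons]
    simp only [List.dropLast_cons₂, List.foldr_cons, hlast, ih b, pvSegs]
    obtain ⟨x, xs, hx⟩ := pvSegs_cons b t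
    rw [hx, pv_join_cons_cons, pv_join_cons_cons]
    simp [String.append_assoc]

-- ===== VERDICT (by name: the statement is the Claim_ definition above) =====
theorem build_name_path_spec : Claim_equal_build_name_path := by
  intro path _
  unfold Spec_build_name_path build_name_path build_name_path_alt
  by_cases h : path = []
  · simp [h]
  · simp only [h, if_false]
    rw [pv_segments_eq path h]
    obtain ⟨a, tl, rfl⟩ := List.exists_cons_of_ne_nil h
    rw [PySem.List.slice_to_neg_one, PySem.List.pyGetD_neg_one _ _ h,
      List.foldl_reverse, pv_foldr_eq_join]
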